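-- pv_equiv track=rewrite | github.com/DatHydroGuy/PyHue2 | Game/Shared/TransitionCreator.py | __diagonal_matrix_core
-- ===== SOURCE A (Python) =====
-- def __diagonal_matrix_core(width: int, height: int, number_of_bands: int) -> list[list[int]]:
--     matrix = [[0] * width for _ in range(height)]
--     for counter in range(number_of_bands):
--         for row in range(height):
--             for column in range(width):
--                 if row + column == counter:
--                     matrix[row][column] = counter
--
--     return matrix
-- ===== SOURCE B (Python) =====
-- def __diagonal_matrix_core(width: int, height: int, number_of_bands: int) -> list[list[int]]:
--     # Closed form: cell (r, c) holds r + c iff that diagonal index is below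
--     # number_of_bands (counter r + c is the only one that ever writes it, and
--     # writing 0 on diagonal 0 equals the initial zero), otherwise it stays 0.
--     return [[r + c if r + c < number_of_bands else 0 for c in range(width)]
--             for r in range(height)]
-- ===== Notes on version B (the rewrite author's own statement) =====
-- stated objective: faster
-- what changed: Replaces the triple loop (every band scans every cell) and in-place mutation by a single closed-form comprehension that computes each cell directly as r+c if r+c < number_of_bands else 0.
import Mathlib
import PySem

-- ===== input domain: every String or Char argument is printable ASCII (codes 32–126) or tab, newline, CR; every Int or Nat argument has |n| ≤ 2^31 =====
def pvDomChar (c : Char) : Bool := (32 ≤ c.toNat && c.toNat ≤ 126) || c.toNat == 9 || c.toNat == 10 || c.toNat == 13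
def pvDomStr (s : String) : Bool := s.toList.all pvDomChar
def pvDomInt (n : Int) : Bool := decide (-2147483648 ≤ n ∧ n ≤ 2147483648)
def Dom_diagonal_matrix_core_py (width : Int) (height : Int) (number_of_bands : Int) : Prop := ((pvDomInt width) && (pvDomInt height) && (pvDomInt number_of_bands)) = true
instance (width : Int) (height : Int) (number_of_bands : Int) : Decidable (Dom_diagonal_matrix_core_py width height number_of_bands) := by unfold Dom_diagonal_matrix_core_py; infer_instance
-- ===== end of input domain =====

-- B replaces A's triple loop over bands×rows×columns (with in-place writes) by a
-- closed-form comprehension computing each cell directly; objective: faster.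

-- ===== PORT A =====
-- literal transliteration: zero matrix, then for counter / row / column,
-- 'matrix[row][column] = counter' when row+column == counter (indices produced by
-- range are in bounds, so pyGetD/pySetD are exact here)
def diagonal_matrix_core_py (width : Int) (height : Int) (number_of_bands : Int) : List (List Int) :=
  let matrix := (PySem.List.pyRange 0 height 1).map (fun _ => PySem.List.pyRepeat [(0:Int)] width)
  (PySem.List.pyRange 0 number_of_bands 1).foldl (fun matrix counter =>
    (PySem.List.pyRange 0 height 1).foldl (fun matrix row =>
      (PySem.List.pyRange 0 width 1).foldl (fun matrix column =>
        if row + column = counter then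
          PySem.List.pySetD matrix row (PySem.List.pySetD (PySem.List.pyGetD matrix row []) column counter)
        else matrix) matrix) matrix) matrix

-- ===== PORT B =====
def diagonal_matrix_core_py_alt (width : Int) (height : Int) (number_of_bands : Int) : List (List Int) :=
  (PySem.List.pyRange 0 height 1).map (fun r =>
    (PySem.List.pyRange 0 width 1).map (fun c =>
      if r + c < number_of_bands then r + c else 0))

-- ===== PRECONDITION & SPEC =====
def Spec_diagonal_matrix_core_py (width : Int) (height : Int) (number_of_bands : Int) (out : List (List Int)) : Prop := out = diagonal_matrix_core_py_alt width height number_of_bands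
instance (width : Int) (height : Int) (number_of_bands : Int) (out : List (List Int)) : Decidable (Spec_diagonal_matrix_core_py width height number_of_bands out) := by unfold Spec_diagonal_matrix_core_py; infer_instance

-- ===== CLAIM (what is proved, stated in full; the proofs are below) =====
def Claim_equal_diagonal_matrix_core_py : Prop := ∀ (width : Int) (height : Int) (number_of_bands : Int), Dom_diagonal_matrix_core_py width height number_of_bands → Spec_diagonal_matrix_core_py width height number_of_bands (diagonal_matrix_core_py width height number_of_bands)

-- ===== LEMMAS AND PROOFS =====

-- 'mk H W f' is the H×W matrix with entry f r c
def pvMk (H W : Nat) (f : Nat → Nat → Int) : List (List Int) :=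
  (List.range H).map (fun r => (List.range W).map (f r))

theorem pvMk_congr (H W : Nat) (f g : Nat → Nat → Int)
    (h : ∀ r < H, ∀ c < W, f r c = g r c) : pvMk H W f = pvMk H W g := by
  unfold pvMk
  refine List.map_congr_left (fun r hr => List.map_congr_left (fun c hc => ?_))
  exact h r (List.mem_range.mp hr) c (List.mem_range.mp hc)

theorem pvSet_map_range {α : Type} (n r : Nat) (f : Nat → α) (v : α) :
    ((List.range n).map f).set r v = (List.range n).map (fun i => if i = r then v else f i) := by
  apply List.ext_getElem (by simp)
  intro i h1 h2
  simp only [List.getElem_set, List.getElem_map, List.getElem_range]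
  by_cases h : i = r
  · simp [h]
  · rw [if_neg (fun hh => h hh.symm), if_neg h]

theorem pvColfold (H W : Nat) (k : Int) (r : Nat) (hr : r < H)
    (cs : List Nat) (hcs : ∀ c ∈ cs, c < W) (f : Nat → Nat → Int) :
    cs.foldl (fun m (c : Nat) =>
        if (r:Int) + (c:Int) = k then m.set r ((m.getD r []).set c k) else m) (pvMk H W f)
    = pvMk H W (fun r' c' => if r' = r ∧ c' ∈ cs ∧ (r:Int) + (c':Int) = k then k else f r' c') := by
  induction cs generalizing f with
  | nil =>
    rw [List.foldl_nil]
    apply pvMk_congr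
    intro r' _ c' _
    simp
  | cons c cs ih =>
    simp only [List.foldl_cons]
    have hc : c < W := hcs c (by simp)
    have hcs' : ∀ x ∈ cs, x < W := fun x hx => hcs x (by simp [hx])
    by_cases hk : (r:Int) + (c:Int) = k
    · rw [if_pos hk]
      have hget : (pvMk H W f).getD r [] = (List.range W).map (f r) := by
        unfold pvMk
        rw [List.getD_eq_getElem _ _ (by simpa using hr)]
        simp
      have hrow : ((List.range W).map (f r)).set c k
          = (List.range W).map (fun c' => if c' = c then k else f r c') :=
        pvSet_map_range W c _ _
      have hmat : (pvMk H W f).set r ((List.range W).map (fun c' => if c' = c then k else f r c'))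
          = pvMk H W (fun r' c' => if r' = r ∧ c' = c then k else f r' c') := by
        unfold pvMk
        rw [pvSet_map_range H r]
        refine List.map_congr_left (fun r' _ => ?_)
        by_cases h : r' = r <;> simp [h]
      rw [hget, hrow, hmat, ih hcs' _]
      apply pvMk_congr
      intro r' _ c' _
      by_cases h1 : r' = r <;> by_cases h2 : c' = c <;>
        simp [h1, h2, hk]
    · rw [if_neg hk, ih hcs' _]
      apply pvMk_congr
      intro r' _ c' _
      by_cases h1 : r' = r <;> by_cases h2 : c' = c <;> simp [h1, h2, hk]

theorem pvRowfold (H W : Nat) (k : Int)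
    (rs : List Nat) (hrs : ∀ r ∈ rs, r < H) (f : Nat → Nat → Int) :
    rs.foldl (fun m (r : Nat) =>
        (List.range W).foldl (fun m (c : Nat) =>
          if (r:Int) + (c:Int) = k then m.set r ((m.getD r []).set c k) else m) m) (pvMk H W f)
    = pvMk H W (fun r' c' => if r' ∈ rs ∧ (r':Int) + (c':Int) = k then k else f r' c') := by
  induction rs generalizing f with
  | nil =>
    rw [List.foldl_nil]
    apply pvMk_congr
    intro r' _ c' _
    simp
  | cons r rs ih =>
    simp only [List.foldl_cons]
    have hr : r < H := hrs r (by simp)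
    rw [pvColfold H W k r hr (List.range W) (fun c hc => List.mem_range.mp hc) f,
        ih (fun x hx => hrs x (by simp [hx]))]
    apply pvMk_congr
    intro r' _ c' hc'
    by_cases h1 : r' = r <;> by_cases h2 : r' ∈ rs <;>
      simp [h1, h2, List.mem_range.mpr hc'] <;> subst_vars <;> tauto

theorem pvMain (H W n : Nat) :
    (List.range n).foldl (fun m (k : Nat) =>
      (List.range H).foldl (fun m (r : Nat) =>
        (List.range W).foldl (fun m (c : Nat) =>
          if (r:Int) + (c:Int) = (k:Int) then m.set r ((m.getD r []).set c (k:Int)) else m) m) m)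
      (pvMk H W (fun _ _ => 0))
    = pvMk H W (fun r c => if (r:Int) + (c:Int) < (n:Int) then (r:Int) + (c:Int) else 0) := by
  induction n with
  | zero =>
    apply pvMk_congr
    intro r _ c _
    simp
    omega
  | succ n ih =>
    rw [List.range_succ, List.foldl_append, ih, List.foldl_cons, List.foldl_nil,
        pvRowfold H W (n:Int) (List.range H) (fun r hr => List.mem_range.mp hr)]
    apply pvMk_congr
    intro r hrH c hcW
    simp only [List.mem_range]
    split_ifs <;> push_cast at * <;> omega

-- ===== VERDICT (by name: the statement is the Claim_ definition above) =====
theorem diagonal_matrix_core_py_spec : Claim_equal_diagonal_matrix_core_py := by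
  intro width height number_of_bands _
  unfold Spec_diagonal_matrix_core_py diagonal_matrix_core_py diagonal_matrix_core_py_alt
  simp only [PySem.List.pyRange_zero, PySem.List.pyRepeat_singleton, List.foldl_map,
    PySem.List.pySetD_natCast, PySem.List.pyGetD_natCast, List.map_map]
  have hz : (List.range height.toNat).map ((fun _ => List.replicate width.toNat (0:Int)) ∘ (fun k : Nat => (k:Int)))
      = pvMk height.toNat width.toNat (fun _ _ => 0) := by
    unfold pvMk
    refine List.map_congr_left (fun r _ => ?_)
    simp [List.map_const', Function.comp]
  rw [hz]
  rw [pvMain height.toNat width.toNat number_of_bands.toNat]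
  unfold pvMk
  refine List.map_congr_left (fun r _ => List.map_congr_left (fun c _ => ?_))
  have : ((number_of_bands.toNat : Int) = number_of_bands) ∨ (number_of_bands < 0) := by omega
  rcases this with h | h
  · rw [h]
    simp [Function.comp]
  · have h2 : ¬ ((r:Int) + (c:Int) < number_of_bands) := by omega
    simp [h2, Function.comp]
    omega
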